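-- pv_equiv track=rewrite | github.com/alexandraback/datacollection | solutions_5688567749672960_0/Python/gaulois/counter_culture.py | solve
-- ===== SOURCE A (Python) =====
-- def jump(i):
--     iS = list(str(i))
--     iS.reverse()
--     return int("".join(iS))
--
-- def solve(N):
--
--     t = 0
--     i = 0
--     P = {}
--     while i < N:
--         iJump = jump(i)
--
--         if iJump > i+1:
--             P[iJump] = t+1
--
--         i += 1
--         t += 1
--
--         if i in P:
--             if P[i] < t:
--                 t = P[i]
--
--     return t
-- ===== SOURCE B (Python) =====
-- def solve(N):
--     # No dict of pending jumps: rev(n) has as many digits as n whenever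
--     # n % 10 != 0, so the only reverse-predecessor of n that can lie below
--     # n - 1 is rev(n) itself; compute it directly and take an ordinary min.
--     if N <= 0:
--         return 0
--     c = [0]
--     for n in range(1, N + 1):
--         best = c[n - 1] + 1
--         if n % 10:
--             w = int(str(n)[::-1])
--             if w + 1 < n and c[w] + 1 < best:
--                 best = c[w] + 1
--         c.append(best)
--     return c[N]
-- ===== Notes on version B (the rewrite author's own statement) =====
-- stated objective: faster
-- what changed: A runs an online pass that, at each source i, pushes the future shortcut target int(str(i)[::-1]) into a dict and rewinds its running step counter t whenever it reaches a stored key; B never enumerates sources or stores pending jumps: it uses the number-theoretic fact (proved in the Lean file) that the only reverse-predecessor of n that can lie below n-1 is rev(n) itself, so each cost is an ordinary two-way min computed directly from n's digits in one pass with no dict.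
import Mathlib
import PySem

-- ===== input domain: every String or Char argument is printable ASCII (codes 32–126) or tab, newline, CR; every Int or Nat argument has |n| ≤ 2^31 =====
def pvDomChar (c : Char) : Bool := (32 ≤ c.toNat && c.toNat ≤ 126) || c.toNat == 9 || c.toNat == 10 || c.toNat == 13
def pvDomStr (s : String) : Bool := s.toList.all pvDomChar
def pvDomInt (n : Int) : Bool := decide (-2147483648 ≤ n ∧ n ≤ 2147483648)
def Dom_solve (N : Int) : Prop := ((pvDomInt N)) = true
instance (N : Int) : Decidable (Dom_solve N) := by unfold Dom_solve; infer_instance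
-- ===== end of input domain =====

-- B drops A's dict of pending reverse-jumps and its counter rewind: the only useful
-- reverse-predecessor of n is rev(n) itself (proved below), so B is one plain pass
-- taking a two-way min per value (same asymptotic cost, measurably faster constants).

-- ===== PORT A =====
-- jump(i) = int(str(i)[reversed]); the .getD 0 default is never reached for the
-- i ≥ 0 fed to it by the loop (the reversed numeral is a nonempty digit string).
def jump (i : Int) : Int :=
  (PySem.Int.ofChars? ((PySem.Int.toChars i).reverse)).getD 0

-- A's dict P is only ever read by key lookup / membership and never iterated,
-- so it is ported as a hash map (lookup/overwrite semantics agree with Python's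
-- dict exactly); the PySem association-list dict has the same semantics here but
-- is not evaluable at the input sizes the tester samples.
-- the while-loop of A; fuel = number of remaining iterations = (N - i).toNat
def solveLoop (N : Int) : Nat → Int → Int → Std.HashMap Int Int → Int
  | 0, _, t, _ => t
  | fuel+1, i, t, P =>
    if i < N then
      let iJump := jump i
      let P' := if iJump > i + 1 then P.insert iJump (t + 1) else P
      let i' := i + 1
      let t' := t + 1
      let t'' := match P'[i']? with
        | some v => if v < t' then v else t'
        | none => t'
      solveLoop N fuel i' t'' P'
    else t

def solve (N : Int) : Int := solveLoop N N.toNat 0 0 (∅ : Std.HashMap Int Int)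

-- ===== PORT B =====
-- int(str(n)[::-1]) of Source B; the .getD 0 default is never reached for n ≥ 1.
def revB (n : Int) : Int :=
  (PySem.Int.ofChars? ((PySem.Int.toChars n).reverse)).getD 0

-- one body of Source B's for-loop: c is the list built so far, n the loop value;
-- all list indices (n-1 and w) are in range here, where pyGetD is exact.
def stepB (c : List Int) (n : Int) : List Int :=
  let best := PySem.List.pyGetD c (n - 1) 0 + 1
  let best2 :=
    if PySem.Int.mod n 10 ≠ 0 then
      let w := revB n
      if w + 1 < n ∧ PySem.List.pyGetD c w 0 + 1 < best then PySem.List.pyGetD c w 0 + 1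
      else best
    else best
  c ++ [best2]

def solve_alt (N : Int) : Int :=
  if N ≤ 0 then 0
  else PySem.List.pyGetD ((PySem.List.pyRange 1 (N + 1) 1).foldl stepB [0]) N 0

-- ===== PRECONDITION & SPEC =====
def Spec_solve (N : Int) (out : Int) : Prop := out = solve_alt N
instance (N : Int) (out : Int) : Decidable (Spec_solve N out) := by unfold Spec_solve; infer_instance

-- ===== CLAIM (what is proved, stated in full; the proofs are below) =====
def Claim_equal_solve : Prop := ∀ (N : Int), Dom_solve N → Spec_solve N (solve N)

-- ===== LEMMAS AND PROOFS =====

-- ---------- 1. semantics of int(s) on pure digit strings ----------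
-- PySem.Int.ofChars?'s digit scanner is a private definition; this existential
-- captures it together with its defining equations (each conjunct is `rfl`).
theorem capG : ∃ D : List Char → Option Nat, ∃ G : List Char → Bool → Nat → Option Nat,
    (∀ cs : List Char,
      PySem.Int.ofChars? cs =
        (match (List.dropWhile PySem.Int.isIntSpace (List.dropWhile PySem.Int.isIntSpace cs).reverse).reverse with
         | '-' :: ds => Option.map (fun n : Int => -n) (Bind.bind (D ds) (fun a : Nat => Pure.pure ((a : Int))))
         | '+' :: ds => Option.map (fun n : Int => n) (Bind.bind (D ds) (fun a : Nat => Pure.pure ((a : Int))))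
         | ds => Option.map (fun n : Int => n) (Bind.bind (D ds) (fun a : Nat => Pure.pure ((a : Int)))))) ∧
    (∀ ds : List Char, D ds = match ds with | [] => none | cs => G cs false 0) ∧
    (∀ b a, G [] b a = if b then some a else none) ∧
    (∀ c rest b a, G (c :: rest) b a =
      if c.isDigit then G rest true (a * 10 + (c.toNat - '0'.toNat))
      else
        if c = '_' ∧ b = true then
          match rest with
          | d :: _ => if d.isDigit then G rest false a else none
          | [] => none
        else none) :=
  ⟨_, _, fun _ => rfl, fun _ => rfl, fun _ _ => rfl, fun _ _ _ _ => rfl⟩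

lemma digitChar_isDigit {d : Nat} (h : d < 10) : (Nat.digitChar d).isDigit = true := by
  interval_cases d <;> decide

lemma digitChar_not_space {d : Nat} (h : d < 10) :
    PySem.Int.isIntSpace (Nat.digitChar d) = false := by
  interval_cases d <;> decide

lemma digitChar_ne_neg {d : Nat} (h : d < 10) : Nat.digitChar d ≠ '-' := by
  interval_cases d <;> decide

lemma digitChar_ne_pos {d : Nat} (h : d < 10) : Nat.digitChar d ≠ '+' := by
  interval_cases d <;> decide

lemma digitChar_val {d : Nat} (h : d < 10) : (Nat.digitChar d).toNat - '0'.toNat = d := by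
  interval_cases d <;> decide

lemma dropWhile_eq_self_of_all {p : Char → Bool} {l : List Char}
    (h : ∀ c ∈ l, p c = false) : l.dropWhile p = l := by
  cases l with
  | nil => rfl
  | cons c t => simp [h c (by simp)]

-- value of the digit scanner on a pure digit string, msb first
lemma ofChars?_digits (ds : List Nat) (hne : ds ≠ []) (hlt : ∀ d ∈ ds, d < 10) :
    PySem.Int.ofChars? (ds.map Nat.digitChar) =
      some ((ds.foldl (fun a d => a * 10 + d) 0 : Nat) : Int) := by
  obtain ⟨D, G, h0, h1, h2, h3⟩ := capG
  have hGall : ∀ (l : List Nat), (∀ d ∈ l, d < 10) → ∀ a : Nat,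
      G (l.map Nat.digitChar) true a = some (l.foldl (fun x d => x * 10 + d) a) := by
    intro l
    induction l with
    | nil => intro _ a; simpa using h2 true a
    | cons d t ih =>
      intro hl a
      have hd : d < 10 := hl d (by simp)
      rw [List.map_cons, h3, if_pos (digitChar_isDigit hd), digitChar_val hd]
      exact ih (fun x hx => hl x (by simp [hx])) (a * 10 + d)
  have hspace : ∀ c ∈ ds.map Nat.digitChar, PySem.Int.isIntSpace c = false := by
    intro c hc
    obtain ⟨d, hd, rfl⟩ := List.mem_map.mp hc
    exact digitChar_not_space (hlt d hd)
  have hstrip :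
      (List.dropWhile PySem.Int.isIntSpace
        (List.dropWhile PySem.Int.isIntSpace (ds.map Nat.digitChar)).reverse).reverse
        = ds.map Nat.digitChar := by
    rw [dropWhile_eq_self_of_all hspace,
        dropWhile_eq_self_of_all (by intro c hc; exact hspace c (List.mem_reverse.mp hc)),
        List.reverse_reverse]
  rw [h0, hstrip]
  obtain ⟨d0, t0, rfl⟩ : ∃ d0 t0, ds = d0 :: t0 := by
    cases ds with
    | nil => exact absurd rfl hne
    | cons a b => exact ⟨a, b, rfl⟩
  have hd0 : d0 < 10 := hlt d0 (by simp)
  have hG : G (d0.digitChar :: List.map Nat.digitChar t0) false 0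
      = some (List.foldl (fun a d => a * 10 + d) 0 (d0 :: t0)) := by
    rw [h3, if_pos (digitChar_isDigit hd0), digitChar_val hd0, List.foldl_cons]
    exact hGall t0 (fun x hx => hlt x (by simp [hx])) (0 * 10 + d0)
  have hD : D (d0.digitChar :: List.map Nat.digitChar t0)
      = some (List.foldl (fun a d => a * 10 + d) 0 (d0 :: t0)) := by
    rw [h1]; exact hG
  split
  · next ds' heq => exact absurd (List.cons.inj heq).1 (digitChar_ne_neg hd0)
  · next ds' heq => exact absurd (List.cons.inj heq).1 (digitChar_ne_pos hd0)
  · next h' h'' =>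
    rw [show List.map Nat.digitChar (d0 :: t0) = d0.digitChar :: List.map Nat.digitChar t0 from rfl, hD]
    rfl

-- ---------- 2. str(n) via Nat.digits ----------
lemma toDigitsCore_digits :
    ∀ (f n : Nat) (l : List Char), 0 < n → n < 10 ^ f →
      Nat.toDigitsCore 10 f n l = ((Nat.digits 10 n).reverse.map Nat.digitChar) ++ l := by
  intro f
  induction f with
  | zero => intro n l hn hf; simp at hf; omega
  | succ f ih =>
    intro n l hn hf
    rw [show Nat.toDigitsCore 10 (f + 1) n l =
        (if n / 10 = 0 then (n % 10).digitChar :: l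
         else Nat.toDigitsCore 10 f (n / 10) ((n % 10).digitChar :: l)) from rfl]
    by_cases h0 : n / 10 = 0
    · have hn10 : n < 10 := by omega
      have : Nat.digits 10 n = [n % 10] := by
        rw [Nat.digits_def' (by norm_num : (1:Nat) < 10) hn, h0]
        simp
      simp [h0, this]
    · have hpos : 0 < n / 10 := Nat.pos_of_ne_zero h0
      have hlt : n / 10 < 10 ^ f := by
        rw [Nat.div_lt_iff_lt_mul (by norm_num : (0:Nat) < 10)]
        calc n < 10 ^ (f + 1) := hf
        _ = 10 ^ f * 10 := by ring
      rw [if_neg h0, ih (n / 10) _ hpos hlt,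
          Nat.digits_def' (by norm_num : (1:Nat) < 10) hn]
      simp

lemma toChars_eq (n : Nat) (hn : 0 < n) :
    PySem.Int.toChars (n : Int) = (Nat.digits 10 n).reverse.map Nat.digitChar := by
  have h1 : ¬ ((n : Int) < 0) := by omega
  rw [PySem.Int.toChars, if_neg h1, Int.toNat_natCast, Nat.toDigits]
  have hf : n < 10 ^ (n + 1) := by
    calc n < 2 ^ n := Nat.lt_two_pow_self
    _ ≤ 10 ^ n := Nat.pow_le_pow_left (by norm_num) n
    _ ≤ 10 ^ (n + 1) := Nat.pow_le_pow_right (by norm_num) (by omega)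
  rw [toDigitsCore_digits (n + 1) n [] hn hf, List.append_nil]

-- ---------- 3. jump on naturals ----------
-- reversal of the decimal numeral of a natural number
def revNat (n : Nat) : Nat := Nat.ofDigits 10 ((Nat.digits 10 n).reverse)

lemma foldl_msb (l : List Nat) : ∀ a : Nat,
    l.foldl (fun x d => x * 10 + d) a = a * 10 ^ l.length + Nat.ofDigits 10 l.reverse := by
  induction l with
  | nil => intro a; simp
  | cons d t ih =>
    intro a
    rw [List.foldl_cons, ih (a * 10 + d), List.reverse_cons, Nat.ofDigits_append]
    simp [Nat.ofDigits_cons, Nat.ofDigits_nil, pow_succ]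
    ring

lemma jump_nat (n : Nat) : jump (n : Int) = (revNat n : Int) := by
  rcases Nat.eq_zero_or_pos n with rfl | hn
  · decide
  · rw [jump, toChars_eq n hn, ← List.map_reverse, List.reverse_reverse,
        ofChars?_digits (Nat.digits 10 n) (Nat.digits_ne_nil_iff_ne_zero.mpr (by omega))
          (fun d hd => Nat.digits_lt_base (by norm_num) hd),
        foldl_msb]
    simp [revNat]

lemma revB_eq_jump : revB = jump := rfl

-- ---------- 4. the reverse-predecessor facts ----------
lemma ofDigits_replicate_zero (k : Nat) : Nat.ofDigits 10 (List.replicate k 0) = 0 := by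
  induction k with
  | zero => rfl
  | succ k ih => rw [List.replicate_succ, Nat.ofDigits_cons, ih]

lemma head_digits (n : Nat) (hn : 0 < n) :
    (Nat.digits 10 n).head? = some (n % 10) := by
  rw [Nat.digits_def' (by norm_num : (1:Nat) < 10) hn]; rfl

lemma head_of_head? {l : List Nat} {v : Nat} (h : l.head? = some v) (hne : l ≠ []) :
    l.head hne = v := by
  cases l with
  | nil => exact absurd rfl hne
  | cons a t => simpa using h

lemma rev_rev (n : Nat) (hn : 0 < n) (h10 : n % 10 ≠ 0) : revNat (revNat n) = n := by
  have hdig : Nat.digits 10 (revNat n) = (Nat.digits 10 n).reverse := by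
    apply Nat.digits_ofDigits 10 (by norm_num)
    · intro d hd
      exact Nat.digits_lt_base (by norm_num) (List.mem_reverse.mp hd)
    · intro hne
      rw [List.getLast_reverse hne,
          head_of_head? (head_digits n hn) (by simpa using hne)]
      exact h10
  rw [revNat, hdig, List.reverse_reverse, Nat.ofDigits_digits]

lemma getLast_congr {l₁ l₂ : List Nat} (h : l₁ = l₂) (h₁ : l₁ ≠ []) (h₂ : l₂ ≠ []) :
    l₁.getLast h₁ = l₂.getLast h₂ := by subst h; rfl

-- any w that reverses to a value above w+1 is exactly the reversal of that value
lemma writer_unique (w n : Nat) (hn : 1 ≤ n) (hrev : revNat w = n) (hlt : w + 1 < n) :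
    n % 10 ≠ 0 ∧ w = revNat n := by
  have hw : w ≠ 0 := by
    rintro rfl
    have : revNat 0 = 0 := rfl
    omega
  set d := Nat.digits 10 w with hd
  have hdne : d ≠ [] := Nat.digits_ne_nil_iff_ne_zero.mpr hw
  have hdlt : ∀ x ∈ d, x < 10 := fun x hx => Nat.digits_lt_base (by norm_num) hx
  have hlastd : d.getLast hdne ≠ 0 := Nat.getLast_digit_ne_zero 10 hw
  set pz : Nat → Bool := fun x => x == 0 with hpz
  set t := d.takeWhile pz with ht
  set d' := d.dropWhile pz with hd'
  have hsplit : t ++ d' = d := List.takeWhile_append_dropWhile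
  have htrep : t = List.replicate t.length 0 := by
    apply List.eq_replicate_of_mem
    intro x hx
    have := List.mem_takeWhile_imp hx
    simpa [hpz] using this
  have hd'ne : d' ≠ [] := by
    intro hnil
    have : d = t := by rw [← hsplit, hnil, List.append_nil]
    have h0 : d.getLast hdne = 0 := by
      have h2 : d = List.replicate t.length 0 := by rw [this, ← htrep]
      have h3 : List.replicate t.length (0:Nat) ≠ [] := by rw [← h2]; exact hdne
      have h4 : d.getLast hdne = (List.replicate t.length (0:Nat)).getLast h3 :=
        getLast_congr h2 hdne h3
      rw [h4]
      exact List.getLast_replicate h3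
    exact hlastd h0
  have hlast' : d'.getLast hd'ne ≠ 0 := by
    have hne2 : t ++ d' ≠ [] := by rw [hsplit]; exact hdne
    have heq : d.getLast hdne = (t ++ d').getLast hne2 := getLast_congr hsplit.symm hdne hne2
    rw [heq, List.getLast_append_right hd'ne] at hlastd
    exact hlastd
  have hd'lt : ∀ x ∈ d', x < 10 := fun x hx => hdlt x (List.dropWhile_sublist pz |>.mem hx)
  have hhead' : ∀ h : d' ≠ [], d'.head h ≠ 0 := by
    intro h
    have := List.head_dropWhile_not pz (l := d) (by rw [← hd']; exact h)
    simp only [hpz, beq_eq_false_iff_ne, ne_eq] at this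
    simpa [hd'] using this
  set m := Nat.ofDigits 10 d' with hm
  have hdigm : Nat.digits 10 m = d' := Nat.digits_ofDigits 10 (by norm_num) d' hd'lt (fun _ => hlast')
  have hwdec : w = Nat.ofDigits 10 t + 10 ^ t.length * m := by
    conv_lhs => rw [← Nat.ofDigits_digits 10 w, ← hd, ← hsplit]
    rw [Nat.ofDigits_append]
  have hoft : Nat.ofDigits 10 t = 0 := by rw [htrep]; exact ofDigits_replicate_zero _
  have hnrev : n = Nat.ofDigits 10 d'.reverse := by
    rw [← hrev, revNat, ← hd, ← hsplit, List.reverse_append, Nat.ofDigits_append]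
    rw [htrep, List.reverse_replicate, ofDigits_replicate_zero]
    ring
  have hdign : Nat.digits 10 n = d'.reverse := by
    rw [hnrev]
    apply Nat.digits_ofDigits 10 (by norm_num)
    · intro x hx; exact hd'lt x (List.mem_reverse.mp hx)
    · intro hne
      rw [List.getLast_reverse hne]
      exact hhead' (by simpa using hne)
  have hmod : n % 10 ≠ 0 := by
    have hn0 : 0 < n := hn
    have h1 : (Nat.digits 10 n).head? = some (n % 10) := head_digits n hn0
    rw [hdign, List.head?_reverse, List.getLast?_eq_some_getLast hd'ne] at h1
    intro hcon
    exact hlast' (by rw [Option.some.inj h1]; exact hcon)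
  have hrevn : revNat n = m := by
    rw [revNat, hdign, List.reverse_reverse, ← hm]
  refine ⟨hmod, ?_⟩
  have hk0 : t.length = 0 := by
    by_contra hk
    have hm0 : m ≠ 0 := by
      intro h0
      rw [h0, Nat.digits_zero] at hdigm
      exact hd'ne hdigm.symm
    have hlen : (Nat.digits 10 n).length = (Nat.digits 10 m).length := by
      rw [hdign, hdigm, List.length_reverse]
    have h2 : n < 10 ^ (Nat.digits 10 n).length := Nat.lt_base_pow_length_digits (by norm_num)
    have h3 : 10 ^ (Nat.digits 10 m).length ≤ 10 * m := Nat.base_pow_length_digits_le 10 m (by norm_num) hm0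
    have h4 : n < 10 * m := by rw [hlen] at h2; omega
    have h5 : 10 * m ≤ 10 ^ t.length * m := by
      apply Nat.mul_le_mul_right
      calc (10:Nat) = 10 ^ 1 := (pow_one 10).symm
      _ ≤ 10 ^ t.length := Nat.pow_le_pow_right (by norm_num) (by omega)
    omega
  rw [hwdec, hoft, hk0, hrevn]
  simp

-- ---------- 5. the model of the cost sequence (shared by both directions) ----------
def g (w : Nat) : Int := jump (w : Int)

-- writer test for target j: at step w, A stores P[jump w] iff jump w > w+1
def qualb (j : Int) (w : Nat) : Bool := decide ((w : Int) + 1 < g w ∧ g w = j)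

-- last writer among steps 0..i-1 for dict key j
def lastW (i : Nat) (j : Int) : Option Nat := ((List.range i).filter (qualb j)).getLast?

-- the cost sequence: cl n = [c 0, …, c n]
def clStep (n : Nat) (l : List Int) : Int :=
  let base := l.getD n 0 + 1
  match lastW (n + 1) ((n : Int) + 1) with
  | some w => if l.getD w 0 + 1 < base then l.getD w 0 + 1 else base
  | none => base

def cl : Nat → List Int
  | 0 => [0]
  | n + 1 => cl n ++ [clStep n (cl n)]

def cv (n : Nat) : Int := (cl n).getD n 0

lemma length_cl (n : Nat) : (cl n).length = n + 1 := by
  induction n with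
  | zero => rfl
  | succ n ih => simp [cl, ih]

lemma getD_cl_of_le {k n : Nat} (h : k ≤ n) : (cl n).getD k 0 = cv k := by
  induction n with
  | zero => interval_cases k; rfl
  | succ n ih =>
    rcases Nat.lt_or_ge k (n+1) with hk | hk
    · have : (cl (n+1)).getD k 0 = (cl n).getD k 0 := by
        have hlen : k < (cl n).length := by simp [length_cl]; omega
        simp only [cl, List.getD, List.getElem?_append_left hlen]
      rw [this, ih (Nat.lt_succ_iff.mp hk)]
    · have : k = n + 1 := le_antisymm h hk
      subst this; rfl

lemma lastW_succ_of_not (i : Nat) (j : Int) (h : qualb j i = false) :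
    lastW (i + 1) j = lastW i j := by
  simp [lastW, List.range_succ, List.filter_append, h]

lemma lastW_succ_of_qual (i : Nat) (j : Int) (h : qualb j i = true) :
    lastW (i + 1) j = some i := by
  simp [lastW, List.range_succ, List.filter_append, h]

lemma cv_succ (n : Nat) : cv (n+1) = clStep n (cl n) := by
  have h : (cl n).length = n + 1 := length_cl n
  simp only [cv, cl]
  rw [List.getD_append_right _ _ _ _ (by omega)]
  simp [h]

lemma lastW_mem_lt {i : Nat} {j : Int} {w : Nat} (h : lastW i j = some w) :
    w < i ∧ qualb j w = true := by
  have hm : w ∈ (List.range i).filter (qualb j) := List.mem_of_getLast? h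
  have := List.mem_filter.mp hm
  exact ⟨List.mem_range.mp this.1, this.2⟩

-- hash-map facts used for A's dict
lemma hm_get_insert_self (m : Std.HashMap Int Int) (k v : Int) :
    (m.insert k v)[k]? = some v := by simp

lemma hm_get_insert_ne (m : Std.HashMap Int Int) {k k' : Int} (v : Int) (h : k' ≠ k) :
    (m.insert k v)[k']? = m[k']? := by
  rw [Std.HashMap.getElem?_insert]
  simp [beq_iff_eq]
  intro hh
  exact absurd hh.symm h

-- ---------- 6. A follows the model ----------
lemma loopA_eq (N : Int) (hN : 0 < N) :
    ∀ (fuel i : Nat) (t : Int) (P : Std.HashMap Int Int),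
      (fuel : Int) + i = N →
      t = cv i →
      (∀ j : Int, (i : Int) < j → P[j]? = (lastW i j).map (fun w => cv w + 1)) →
      solveLoop N fuel i t P = cv N.toNat := by
  intro fuel
  induction fuel with
  | zero =>
    intro i t P hfi ht _
    have : i = N.toNat := by omega
    subst this
    simpa [solveLoop] using ht
  | succ fuel ih =>
    intro i t P hfi ht hinv
    have hiN : (i : Int) < N := by push_cast at hfi ⊢; omega
    have hstep : solveLoop N (fuel+1) (i:Int) t P =
        solveLoop N fuel ((i:Int)+1)
          (match (if (i:Int) + 1 < g i then P.insert (g i) (t+1) else P)[((i:Int)+1)]? with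
            | some v => if v < t+1 then v else t+1
            | none => t+1)
          (if (i:Int) + 1 < g i then P.insert (g i) (t+1) else P) := by
      simp only [solveLoop, if_pos hiN, g, gt_iff_lt]
    set P' := (if (i:Int) + 1 < g i then P.insert (g i) (t+1) else P) with hP'
    have hlast_ro : lastW (i+1) ((i:Int)+1) = lastW i ((i:Int)+1) := by
      apply lastW_succ_of_not
      simp only [qualb, decide_eq_false_iff_not]
      rintro ⟨h1, h2⟩; omega
    have hread : P'[((i:Int)+1)]? = (lastW (i+1) ((i:Int)+1)).map (fun w => cv w + 1) := by
      rw [hlast_ro, ← hinv ((i:Int)+1) (by omega)]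
      rw [hP']
      split
      · next hins =>
        exact hm_get_insert_ne P _ (by omega)
      · rfl
    have hinv' : ∀ j : Int, ((i:Int)+1) < j →
        P'[j]? = (lastW (i+1) j).map (fun w => cv w + 1) := by
      intro j hj
      rw [hP']
      split
      · next hins =>
        by_cases hjg : j = g i
        · subst hjg
          rw [hm_get_insert_self]
          rw [lastW_succ_of_qual i (g i) (by simp [qualb]; omega)]
          simp [ht]
        · rw [hm_get_insert_ne P _ hjg]
          rw [lastW_succ_of_not i j (by simp [qualb]; intro h1 h2; exact absurd h2.symm hjg)]
          exact hinv j (by omega)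
      · next hins =>
        rw [lastW_succ_of_not i j (by simp [qualb]; intro h1 h2; omega)]
        exact hinv j (by omega)
    have ht'' : (match P'[((i:Int)+1)]? with
        | some v => if v < t+1 then v else t+1
        | none => t+1) = cv (i+1) := by
      rw [hread, cv_succ, clStep]
      rcases hlw : lastW (i+1) ((i:Int)+1) with _ | w
      · simp [ht]
        rfl
      · have hw := lastW_mem_lt hlw
        have hwle : w ≤ i := by omega
        push_cast
        simp [ht]
        rw [show ((cl i)[w]?.getD 0 : Int) = cv w from getD_cl_of_le hwle,
            show ((cl i)[i]?.getD 0 : Int) = cv i from getD_cl_of_le (le_refl i)]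
    rw [hstep, ht'']
    have hcast : ((i:Int)+1) = (((i+1 : Nat)) : Int) := by push_cast; ring
    rw [hcast]
    exact ih (i+1) (cv (i+1)) P' (by push_cast at hfi ⊢; omega) rfl
      (by intro j hj; exact hinv' j (by push_cast at hj ⊢; omega))

-- ---------- 7. the last writer in closed form ----------
lemma qualb_iff (n w : Nat) (hn : 1 ≤ n) :
    qualb ((n : Nat) : Int) w = true ↔ (n % 10 ≠ 0 ∧ w = revNat n ∧ revNat n + 1 < n) := by
  rw [qualb, decide_eq_true_eq, g, jump_nat]
  constructor
  · rintro ⟨h1, h2⟩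
    have hrev : revNat w = n := by exact_mod_cast h2
    have hlt : w + 1 < n := by
      rw [h2] at h1; exact_mod_cast h1
    obtain ⟨hm, hw⟩ := writer_unique w n hn hrev hlt
    exact ⟨hm, hw, by omega⟩
  · rintro ⟨hm, rfl, hlt⟩
    have h2 : revNat (revNat n) = n := rev_rev n hn hm
    constructor
    · rw [h2]; exact_mod_cast hlt
    · exact_mod_cast h2

lemma lastW_none_of_no_qual (j : Int) : ∀ m, (∀ y, y < m → qualb j y = false) →
    lastW m j = none := by
  intro m
  induction m with
  | zero => intro _; rfl
  | succ m ih =>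
    intro h
    rw [lastW_succ_of_not m j (h m (by omega)), ih (fun y hy => h y (by omega))]

lemma lastW_some_of_unique (j : Int) (w0 : Nat) (hq : qualb j w0 = true)
    (huniq : ∀ y, qualb j y = true → y = w0) :
    ∀ m, w0 < m → lastW m j = some w0 := by
  intro m hm
  induction m, hm using Nat.le_induction with
  | base => exact lastW_succ_of_qual w0 j hq
  | succ m hm ih =>
    have hqm : qualb j m = false := by
      by_contra hc
      have := huniq m (by simpa using Bool.not_eq_false _ ▸ hc)
      omega
    rw [lastW_succ_of_not m j hqm, ih]

lemma lastW_eval (n : Nat) (hn : 1 ≤ n) :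
    lastW n ((n : Nat) : Int) =
      if n % 10 ≠ 0 ∧ revNat n + 1 < n then some (revNat n) else none := by
  by_cases hC : n % 10 ≠ 0 ∧ revNat n + 1 < n
  · rw [if_pos hC]
    apply lastW_some_of_unique
    · exact (qualb_iff n (revNat n) hn).mpr ⟨hC.1, rfl, hC.2⟩
    · intro y hy
      exact ((qualb_iff n y hn).mp hy).2.1
    · omega
  · rw [if_neg hC]
    apply lastW_none_of_no_qual
    intro y _
    by_contra hc
    have := (qualb_iff n y hn).mp (by simpa using Bool.not_eq_false _ ▸ hc)
    exact hC ⟨this.1, this.2.2⟩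

-- ---------- 8. B follows the model ----------
lemma stepB_cl (m : Nat) : stepB (cl m) ((1 : Int) + (m : Int)) = cl (m + 1) := by
  have hcast : (1 : Int) + (m : Int) = ((m + 1 : Nat) : Int) := by push_cast; ring
  have hsub : ((m + 1 : Nat) : Int) - 1 = ((m : Nat) : Int) := by push_cast; ring
  have hbase : PySem.List.pyGetD (cl m) (((m + 1 : Nat) : Int) - 1) 0 = cv m := by
    rw [hsub, PySem.List.pyGetD_natCast, getD_cl_of_le (le_refl m)]
  have hmod : PySem.Int.mod ((m + 1 : Nat) : Int) 10 = (((m + 1) % 10 : Nat) : Int) := by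
    exact_mod_cast PySem.Int.mod_natCast (m + 1) 10
  have hrevB : revB ((m + 1 : Nat) : Int) = ((revNat (m + 1) : Nat) : Int) := by
    rw [revB_eq_jump, jump_nat]
  have hlw : lastW (m + 1) ((m : Int) + 1) =
      if (m + 1) % 10 ≠ 0 ∧ revNat (m + 1) + 1 < m + 1 then some (revNat (m + 1)) else none := by
    have hc : (m : Int) + 1 = (((m + 1 : Nat)) : Int) := by push_cast; ring
    rw [hc]; exact lastW_eval (m + 1) (by omega)
  have hclv : (cl m).getD m 0 = cv m := getD_cl_of_le (le_refl m)
  show stepB (cl m) ((1 : Int) + (m : Int)) = cl m ++ [clStep m (cl m)]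
  rw [hcast]
  simp only [stepB, clStep, hbase, hmod, hrevB, hlw, hclv]
  by_cases hm10 : (m + 1) % 10 = 0
  · rw [if_neg (by simp [hm10]), if_neg (by simp [hm10])]
  · have hC : (((m + 1) % 10 : Nat) : Int) ≠ 0 := by exact_mod_cast hm10
    rw [if_pos hC]
    by_cases hlt : revNat (m + 1) + 1 < m + 1
    · have hwm : revNat (m + 1) ≤ m := by omega
      rw [if_pos (show (m + 1) % 10 ≠ 0 ∧ revNat (m + 1) + 1 < m + 1 from ⟨hm10, hlt⟩),
          PySem.List.pyGetD_natCast, getD_cl_of_le hwm]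
      have h1 : ((revNat (m + 1) : Nat) : Int) + 1 < ((m + 1 : Nat) : Int) := by exact_mod_cast hlt
      simp only [getD_cl_of_le hwm]
      by_cases h2 : cv (revNat (m + 1)) + 1 < cv m + 1
      · rw [if_pos ⟨h1, h2⟩, if_pos h2]
      · rw [if_neg (by rintro ⟨_, hh⟩; exact h2 hh), if_neg h2]
    · rw [if_neg (show ¬ ((m + 1) % 10 ≠ 0 ∧ revNat (m + 1) + 1 < m + 1) from
          by rintro ⟨_, hh⟩; exact hlt hh),
          if_neg (show ¬ (((revNat (m + 1) : Nat) : Int) + 1 < ((m + 1 : Nat) : Int) ∧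
            PySem.List.pyGetD (cl m) ((revNat (m + 1) : Nat) : Int) 0 + 1 < cv m + 1) from
          by rintro ⟨h1', _⟩; exact hlt (by exact_mod_cast h1'))]

lemma foldB_cl : ∀ m : Nat,
    (List.range m).foldl (fun c (k : Nat) => stepB c ((1 : Int) + (k : Int))) [0] = cl m := by
  intro m
  induction m with
  | zero => rfl
  | succ m ih =>
    rw [List.range_succ, List.foldl_append, List.foldl_cons, List.foldl_nil, ih, stepB_cl]

lemma solve_alt_eq (N : Int) (hN : 0 < N) : solve_alt N = cv N.toNat := by
  obtain ⟨k, hk⟩ : ∃ k : Nat, N = (k : Int) := ⟨N.toNat, by omega⟩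
  subst hk
  rw [solve_alt, if_neg (by omega)]
  have hr : PySem.List.pyRange 1 ((k : Int) + 1) 1
      = (List.range k).map (fun j : Nat => (1 : Int) + (j : Int)) := by
    rw [PySem.List.pyRange_one]
    norm_num
  rw [hr, List.foldl_map, foldB_cl, Int.toNat_natCast, PySem.List.pyGetD_natCast,
      getD_cl_of_le (le_refl _)]

theorem solve_eq_alt (N : Int) : solve N = solve_alt N := by
  by_cases h : N ≤ 0
  · have h0 : N.toNat = 0 := by omega
    simp [solve, solve_alt, h0, solveLoop, h]
  · have h' : 0 < N := by omega
    rw [solve_alt_eq N h']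
    unfold solve
    apply loopA_eq N h' N.toNat 0 0
    · omega
    · have : cv 0 = 0 := rfl
      omega
    · intro j hj
      have : lastW 0 j = none := rfl
      simp [this]

-- ===== VERDICT (by name: the statement is the Claim_ definition above) =====
theorem solve_spec : Claim_equal_solve := by
  intro N _
  unfold Spec_solve
  exact solve_eq_alt N
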